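-- pv_equiv track=rewrite | github.com/lamnguynn/Python-Yahtzee_Game | Yahtzee_Background_Code.py | a_kind
-- ===== SOURCE A (Python) =====
-- def a_kind(dice_roll, num_of_kind):
--     '''
--     :purpose: finds if the dice roll has a x of a kind (x can be any number)
--     :param dice_roll:
--     :param num_of_kind:
--     :return: a sum of all the rolls if there is a x of a kind (x can be any number).
--     :comments: since the for Three of a kind and Four of a kind are similar, it is reasonable to write one function and catch the differences in if statements.
--     '''
--     occur = 0               # how many times a number occurs
--     occur_type = 0          # stores the number that occurs 3 times
--     # Loops through the list passed in and checks to see if a number occurs num_of_kind or more times.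
--     for i in range(len(dice_roll)):
--         occur = 0
--         for r in range(len(dice_roll)):
--             if i != r:                                  #does not do a comparison with itself
--                 if dice_roll[i] == dice_roll[r]:        #checking to see if two numbers are the same
--                     occur += 1
--                     occur_type = dice_roll[i]
--         if occur == num_of_kind - 1:
--             return sum(dice_roll)           #if a number occurs num_of_kind - 1 times, immediately return the value and the sum of the list
-- ===== SOURCE B (Python) =====
-- def a_kind(dice_roll, num_of_kind):
--     # One counting pass with a dict, then one membership test on the counts.
--     counts = {}
--     for v in dice_roll:
--         counts[v] = counts.get(v, 0) + 1
--     if num_of_kind in counts.values():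
--         return sum(dice_roll)
--     return None
-- ===== Notes on version B (the rewrite author's own statement) =====
-- stated objective: faster
-- what changed: Replaces A's O(n^2) nested pairwise scan (for each index, re-count its matches) with one dict counting pass followed by a single membership test on the counts.
import Mathlib
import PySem

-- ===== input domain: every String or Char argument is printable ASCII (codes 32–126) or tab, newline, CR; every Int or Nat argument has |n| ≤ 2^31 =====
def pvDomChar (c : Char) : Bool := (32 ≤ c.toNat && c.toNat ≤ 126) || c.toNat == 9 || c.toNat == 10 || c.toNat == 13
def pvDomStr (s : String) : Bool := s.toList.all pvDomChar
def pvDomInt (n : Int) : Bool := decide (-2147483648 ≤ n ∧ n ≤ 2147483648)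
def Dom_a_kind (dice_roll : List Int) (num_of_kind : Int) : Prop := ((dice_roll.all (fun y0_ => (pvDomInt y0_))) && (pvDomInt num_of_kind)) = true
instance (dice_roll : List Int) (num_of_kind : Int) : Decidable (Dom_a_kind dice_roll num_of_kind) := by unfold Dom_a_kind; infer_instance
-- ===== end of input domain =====

-- B replaces A's O(n^2) nested pairwise scan with one dict counting pass plus a membership test on the counts (objective: faster).


-- ===== PORT A =====
-- inner loop: occur accumulated over r in range(len(dice_roll)); occur_type is written but never read, so it is not carried
def aOccur (dice_roll : List Int) (i : Int) : Int :=
  (PySem.List.pyRange 0 (PySem.List.len dice_roll) 1).foldl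
    (fun occur r =>
      if i ≠ r then
        (if PySem.List.pyGetD dice_roll i 0 = PySem.List.pyGetD dice_roll r 0 then occur + 1 else occur)
      else occur) 0

-- outer loop over i in range(len(dice_roll)) with the early return
def aLoop (dice_roll : List Int) (num_of_kind : Int) : List Int → Option Int
  | [] => none
  | i :: rest =>
      if aOccur dice_roll i = num_of_kind - 1 then some dice_roll.sum
      else aLoop dice_roll num_of_kind rest

def a_kind (dice_roll : List Int) (num_of_kind : Int) : Option Int :=
  aLoop dice_roll num_of_kind (PySem.List.pyRange 0 (PySem.List.len dice_roll) 1)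

-- ===== PORT B =====
def a_kind_alt (dice_roll : List Int) (num_of_kind : Int) : Option Int :=
  let counts := dice_roll.foldl (fun d x => d.insert x (d.getD x 0 + 1)) PySem.Dict.empty
  if num_of_kind ∈ counts.values then some dice_roll.sum else none

-- ===== PRECONDITION & SPEC =====
def Spec_a_kind (dice_roll : List Int) (num_of_kind : Int) (out : Option Int) : Prop := out = a_kind_alt dice_roll num_of_kind
instance (dice_roll : List Int) (num_of_kind : Int) (out : Option Int) : Decidable (Spec_a_kind dice_roll num_of_kind out) := by unfold Spec_a_kind; infer_instance

-- ===== CLAIM (what is proved, stated in full; the proofs are below) =====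
def Claim_equal_a_kind : Prop := ∀ (dice_roll : List Int) (num_of_kind : Int), Dom_a_kind dice_roll num_of_kind → Spec_a_kind dice_roll num_of_kind (a_kind dice_roll num_of_kind)

-- ===== LEMMAS AND PROOFS =====

-- a conditional +1 fold is a countP
theorem foldl_ite_add_one (p : Int → Prop) [DecidablePred p] (L : List Int) (c : Int) :
    L.foldl (fun occ r => if p r then occ + 1 else occ) c = c + (L.countP (fun r => decide (p r)) : Int) := by
  induction L generalizing c with
  | nil => simp
  | cons x t ih =>
      simp only [List.foldl_cons, List.countP_cons, ih]
      by_cases hx : p x <;> simp [hx] <;> omega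

-- the inner loop computes count(dice_roll[i]) - 1 for an in-range i
theorem aOccur_eq (xs : List Int) (i : Int) (h0 : 0 ≤ i) (h1 : i < PySem.List.len xs) :
    aOccur xs i = (xs.count (PySem.List.pyGetD xs i 0) : Int) - 1 := by
  unfold aOccur
  have hfun : (fun (occur r : Int) =>
      if i ≠ r then
        (if PySem.List.pyGetD xs i 0 = PySem.List.pyGetD xs r 0 then occur + 1 else occur)
      else occur)
      = fun occ r => if (i ≠ r ∧ PySem.List.pyGetD xs i 0 = PySem.List.pyGetD xs r 0) then occ + 1 else occ := by
    funext occ r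
    by_cases h : i = r <;> by_cases h2 : PySem.List.pyGetD xs i 0 = PySem.List.pyGetD xs r 0 <;> simp [h, h2]
  rw [hfun, foldl_ite_add_one (fun r => i ≠ r ∧ PySem.List.pyGetD xs i 0 = PySem.List.pyGetD xs r 0)]
  -- split the range at i
  have hsplit : PySem.List.pyRange 0 (PySem.List.len xs) 1
      = PySem.List.pyRange 0 i 1 ++ PySem.List.pyRange i (i+1) 1 ++ PySem.List.pyRange (i+1) (PySem.List.len xs) 1 := by
    rw [← PySem.List.pyRange_one_append 0 i (i+1) h0 (by omega),
        ← PySem.List.pyRange_one_append 0 (i+1) (PySem.List.len xs) (by omega) (by omega)]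
  set q : Int → Bool := fun r => decide (PySem.List.pyGetD xs i 0 = PySem.List.pyGetD xs r 0) with hq
  have hcong : ∀ (a b : Int), a ≤ b → (b ≤ i ∨ i < a) →
      (PySem.List.pyRange a b 1).countP
        (fun r => decide (i ≠ r ∧ PySem.List.pyGetD xs i 0 = PySem.List.pyGetD xs r 0))
      = (PySem.List.pyRange a b 1).countP q := by
    intro a b _ hside
    apply List.countP_congr
    intro r hr
    rw [PySem.List.mem_pyRange_one] at hr
    have : i ≠ r := by omega
    simp [hq, this]
  have hcount : (PySem.List.pyRange 0 (PySem.List.len xs) 1).countP q = xs.count (PySem.List.pyGetD xs i 0) := by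
    have hmap := PySem.List.map_pyGetD_pyRange_zero (xs := xs) (d := (0 : Int))
    calc (PySem.List.pyRange 0 (PySem.List.len xs) 1).countP q
        = ((PySem.List.pyRange 0 (PySem.List.len xs) 1).map (fun j => PySem.List.pyGetD xs j 0)).countP
            (fun v => decide (PySem.List.pyGetD xs i 0 = v)) := by
          rw [List.countP_map]; rfl
      _ = xs.countP (fun v => decide (PySem.List.pyGetD xs i 0 = v)) := by rw [hmap]
      _ = xs.count (PySem.List.pyGetD xs i 0) := by
          unfold List.count
          apply List.countP_congr
          intro v _
          by_cases h : PySem.List.pyGetD xs i 0 = v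
          · simp [h]
          · simp [h, Ne.symm h]
  have hmid : (PySem.List.pyRange i (i+1) 1).countP
      (fun r => decide (i ≠ r ∧ PySem.List.pyGetD xs i 0 = PySem.List.pyGetD xs r 0)) = 0 := by
    rw [PySem.List.pyRange_one_singleton]
    simp
  have hmidq : (PySem.List.pyRange i (i+1) 1).countP q = 1 := by
    rw [PySem.List.pyRange_one_singleton]
    simp [hq]
  rw [hsplit]
  simp only [List.countP_append]
  rw [hcong 0 i h0 (by omega), hcong (i+1) (PySem.List.len xs) (by omega) (by omega), hmid]
  rw [hsplit] at hcount
  simp only [List.countP_append] at hcount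
  rw [hmidq] at hcount
  omega

-- the outer loop returns the sum exactly when some index in the remaining range matches
theorem aLoop_eq (xs : List Int) (k : Int) (L : List Int) :
    aLoop xs k L = if (∃ i ∈ L, aOccur xs i = k - 1) then some xs.sum else none := by
  induction L with
  | nil => simp [aLoop]
  | cons x t ih =>
      by_cases hx : aOccur xs x = k - 1
      · simp [aLoop, hx]
      · simp [aLoop, hx, ih]

-- B's counter characterisation: num_of_kind is among the counts iff some element has that exact count
theorem alt_values_mem (xs : List Int) (k : Int) :
    (k ∈ (xs.foldl (fun d x => d.insert x (d.getD x 0 + 1)) PySem.Dict.empty).values)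
    ↔ ∃ v ∈ xs, (xs.count v : Int) = k := by
  rw [PySem.Dict.foldl_insert_getD_add_one_eq_counter]
  have : (PySem.Dict.counter xs).values = (PySem.Set.ofList xs).map (fun v => (xs.count v : Int)) := by
    show ((PySem.Dict.counter xs).items).map (·.2) = _
    rw [PySem.Dict.items_counter]
    simp
  rw [this]
  simp only [List.mem_map]
  constructor
  · rintro ⟨v, hv, rfl⟩
    exact ⟨v, (PySem.Set.mem_ofList _ _).mp hv, rfl⟩
  · rintro ⟨v, hv, rfl⟩
    exact ⟨v, (PySem.Set.mem_ofList _ _).mpr hv, rfl⟩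

-- the existentials of the two sides agree
theorem exists_match_iff (xs : List Int) (k : Int) :
    (∃ i ∈ PySem.List.pyRange 0 (PySem.List.len xs) 1, aOccur xs i = k - 1)
    ↔ ∃ v ∈ xs, (xs.count v : Int) = k := by
  constructor
  · rintro ⟨i, hi, hocc⟩
    rw [PySem.List.mem_pyRange_one] at hi
    rw [aOccur_eq xs i hi.1 hi.2] at hocc
    refine ⟨PySem.List.pyGetD xs i 0, ?_, by omega⟩
    have hi2 : i < (xs.length : Int) := hi.2
    have hi1 : (0 : Int) ≤ i := hi.1
    have hin : PySem.Raise.InRange xs.length i := by unfold PySem.Raise.InRange; omega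
    exact PySem.List.pyGetD_mem (xs := xs) (i := i) (d := (0:Int)) hin
  · rintro ⟨v, hv, hcnt⟩
    obtain ⟨j, hj, rfl⟩ := List.mem_iff_getElem.mp hv
    refine ⟨(j : Int), ?_, ?_⟩
    · rw [PySem.List.mem_pyRange_one]
      constructor
      · positivity
      · have : PySem.List.len xs = (xs.length : Int) := by rfl
        rw [this]; exact_mod_cast hj
    · have hg : PySem.List.pyGetD xs (j : Int) 0 = xs[j] := by
        rw [PySem.List.pyGetD_natCast]
        exact List.getD_eq_getElem xs 0 hj
      have hlt : (j : Int) < PySem.List.len xs := by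
        have : PySem.List.len xs = (xs.length : Int) := by rfl
        rw [this]; exact_mod_cast hj
      rw [aOccur_eq xs (j : Int) (by positivity) hlt, hg]
      omega

-- ===== VERDICT (by name: the statement is the Claim_ definition above) =====
theorem a_kind_spec : Claim_equal_a_kind := by
  intro xs k _
  unfold Spec_a_kind a_kind a_kind_alt
  rw [aLoop_eq]
  by_cases h : ∃ v ∈ xs, (xs.count v : Int) = k
  · rw [if_pos ((exists_match_iff xs k).mpr h), if_pos ((alt_values_mem xs k).mpr h)]
  · rw [if_neg (fun hc => h ((exists_match_iff xs k).mp hc)),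
        if_neg (fun hc => h ((alt_values_mem xs k).mp hc))]
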